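-- pv_equiv track=rewrite | github.com/Lecrut/Diffusion-code-generation | data/code/39_9_6.py | find_nested_substrings
-- ===== SOURCE A (Python) =====
-- def find_nested_substrings(phrase):
--     n = len(phrase)
--     nested_substrings = set()
--     for i in range(n):
--         for j in range(i + 1, n):
--             substring = phrase[i:j+1]
--             for k in range(len(substring)):
--                 for l in range(k + 1, len(substring)):
--                     nested = substring[k:l+1]
--                     nested_substrings.add(nested)
--     result = sorted(list(nested_substrings))
--     return result
-- ===== SOURCE B (Python) =====
-- def find_nested_substrings(phrase):
--     n = len(phrase)
--     subs = set()
--     for i in range(n):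
--         for j in range(i + 2, n + 1):
--             subs.add(phrase[i:j])
--     return sorted(subs)
-- ===== Notes on version B (the rewrite author's own statement) =====
-- stated objective: faster
-- what changed: A enumerates every substring and then all substrings-of-substrings in four nested loops; B collects all substrings of length >= 2 directly with a single double loop over start/end indices, since the nested enumeration yields exactly that set.
import Mathlib
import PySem

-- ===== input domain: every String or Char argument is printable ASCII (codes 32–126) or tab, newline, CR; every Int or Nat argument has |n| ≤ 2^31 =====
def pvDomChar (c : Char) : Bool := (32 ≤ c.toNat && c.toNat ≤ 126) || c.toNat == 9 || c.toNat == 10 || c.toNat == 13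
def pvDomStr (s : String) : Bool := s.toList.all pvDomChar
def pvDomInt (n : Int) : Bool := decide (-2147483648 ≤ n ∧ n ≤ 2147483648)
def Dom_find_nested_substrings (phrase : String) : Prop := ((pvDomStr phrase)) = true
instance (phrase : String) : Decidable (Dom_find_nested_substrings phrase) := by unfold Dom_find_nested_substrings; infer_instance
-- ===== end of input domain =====

-- B replaces A's four nested loops (substrings of substrings) by one double loop collecting
-- all substrings of length ≥ 2 directly: the same set, asymptotically fewer extractions.

-- ===== PORT A =====
def find_nested_substrings (phrase : String) : List String :=
  let n : Int := PySem.Str.len phrase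
  let nested_substrings : PySem.Set String :=
    (PySem.List.pyRange 0 n 1).foldl (fun acc i =>
      (PySem.List.pyRange (i + 1) n 1).foldl (fun acc j =>
        let substring := PySem.Str.slice phrase (some i) (some (j + 1))
        (PySem.List.pyRange 0 (PySem.Str.len substring) 1).foldl (fun acc k =>
          (PySem.List.pyRange (k + 1) (PySem.Str.len substring) 1).foldl (fun acc l =>
            PySem.Set.add acc (PySem.Str.slice substring (some k) (some (l + 1)))) acc) acc) acc)
      PySem.Set.empty
  PySem.List.sorted nested_substrings (fun x => x) false

-- ===== PORT B =====
def find_nested_substrings_alt (phrase : String) : List String :=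
  let n : Int := PySem.Str.len phrase
  let subs : PySem.Set String :=
    (PySem.List.pyRange 0 n 1).foldl (fun acc i =>
      (PySem.List.pyRange (i + 2) (n + 1) 1).foldl (fun acc j =>
        PySem.Set.add acc (PySem.Str.slice phrase (some i) (some j))) acc)
      PySem.Set.empty
  PySem.List.sorted subs (fun x => x) false

-- ===== PRECONDITION & SPEC =====
def Spec_find_nested_substrings (phrase : String) (out : List String) : Prop := out = find_nested_substrings_alt phrase
instance (phrase : String) (out : List String) : Decidable (Spec_find_nested_substrings phrase out) := by unfold Spec_find_nested_substrings; infer_instance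

-- ===== CLAIM (what is proved, stated in full; the proofs are below) =====
def Claim_equal_find_nested_substrings : Prop := ∀ (phrase : String), Dom_find_nested_substrings phrase → Spec_find_nested_substrings phrase (find_nested_substrings phrase)

-- ===== LEMMAS AND PROOFS =====

-- a fold of steps each characterised by P adds exactly the elements satisfying some P j
theorem mem_foldl_step {α : Type} [BEq α] [LawfulBEq α]
    (f : PySem.Set α → Int → PySem.Set α) (P : Int → α → Prop)
    (hf : ∀ s j x, x ∈ f s j ↔ x ∈ s ∨ P j x) :
    ∀ (l : List Int) (s : PySem.Set α) (x : α),
      x ∈ l.foldl f s ↔ x ∈ s ∨ ∃ j ∈ l, P j x := by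
  intro l
  induction l with
  | nil => simp
  | cons a t ih =>
    intro s x
    simp only [List.foldl_cons, ih, hf, List.mem_cons]
    constructor
    · rintro ((h | h) | ⟨j, hj, hP⟩)
      · exact Or.inl h
      · exact Or.inr ⟨a, Or.inl rfl, h⟩
      · exact Or.inr ⟨j, Or.inr hj, hP⟩
    · rintro (h | ⟨j, (rfl | hj), hP⟩)
      · exact Or.inl (Or.inl h)
      · exact Or.inl (Or.inr hP)
      · exact Or.inr ⟨j, hj, hP⟩

theorem nodup_foldl_step {α : Type} [BEq α]
    (f : PySem.Set α → Int → PySem.Set α)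
    (hf : ∀ s j, List.Nodup s → List.Nodup (f s j)) :
    ∀ (l : List Int) (s : PySem.Set α), List.Nodup s → List.Nodup (l.foldl f s) := by
  intro l
  induction l with
  | nil => intro s hs; exact hs
  | cons a t ih => intro s hs; exact ih _ (hf s a hs)

theorem str_eq_iff (x y : String) : x = y ↔ x.toList = y.toList := by
  constructor
  · intro h; rw [h]
  · exact String.toList_inj.mp

theorem toList_str_slice (s : String) (a b : Int) :
    (PySem.Str.slice s (some a) (some b)).toList = PySem.List.slice s.toList (some a) (some b) := by
  simp only [PySem.Str.slice, PySem.Chars.slice_eq_listSlice, String.toList_ofList]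

theorem len_str_slice (s : String) {a b : Int} (ha : 0 ≤ a) (hab : a ≤ b)
    (hb : b ≤ (s.toList.length : Int)) :
    PySem.Str.len (PySem.Str.slice s (some a) (some b)) = b - a := by
  rw [PySem.Str.len_eq, toList_str_slice, PySem.List.slice_toNat s.toList ha (le_trans ha hab)]
  rw [List.length_take, List.length_drop]
  omega

theorem slice_comp (cs : List Char) (a k t m : Nat) (h : k + t ≤ m) :
    (((cs.drop a).take m).drop k).take t = (cs.drop (a + k)).take t := by
  rw [List.drop_take, List.drop_drop, List.take_take]
  congr 1
  omega

-- the set characterisation of B's double loop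
theorem memB (phrase : String) (x : String) :
    x ∈ (PySem.List.pyRange 0 (PySem.Str.len phrase) 1).foldl (fun acc i =>
        (PySem.List.pyRange (i + 2) (PySem.Str.len phrase + 1) 1).foldl (fun acc j =>
          PySem.Set.add acc (PySem.Str.slice phrase (some i) (some j))) acc)
      PySem.Set.empty ↔
    ∃ i j : Int, 0 ≤ i ∧ i + 2 ≤ j ∧ j ≤ (phrase.toList.length : Int) ∧
      x = PySem.Str.slice phrase (some i) (some j) := by
  rw [mem_foldl_step _
      (fun i x => ∃ j ∈ PySem.List.pyRange (i + 2) (PySem.Str.len phrase + 1) 1,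
        x = PySem.Str.slice phrase (some i) (some j))
      (fun s i x => mem_foldl_step _
        (fun j y => y = PySem.Str.slice phrase (some i) (some j))
        (fun s j y => by simp [PySem.Set.mem_add]) _ s x)]
  simp only [PySem.Set.empty, List.not_mem_nil, false_or, PySem.List.mem_pyRange_one,
    PySem.Str.len_eq]
  constructor
  · rintro ⟨i, ⟨hi0, hin⟩, j, ⟨hj1, hj2⟩, rfl⟩
    exact ⟨i, j, hi0, hj1, by omega, rfl⟩
  · rintro ⟨i, j, hi0, hij, hjn, rfl⟩
    exact ⟨i, ⟨hi0, by omega⟩, j, ⟨hij, by omega⟩, rfl⟩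

theorem slice_comp_str (phrase : String) {i j k l : Int}
    (hi : 0 ≤ i) (hk : 0 ≤ k) (hkl : k ≤ l) (hl : l ≤ j - i) (hij : i ≤ j) :
    PySem.Str.slice (PySem.Str.slice phrase (some i) (some j)) (some k) (some l)
      = PySem.Str.slice phrase (some (i + k)) (some (i + l)) := by
  rw [str_eq_iff]
  rw [toList_str_slice, toList_str_slice, toList_str_slice]
  rw [PySem.List.slice_toNat phrase.toList hi (by omega),
      PySem.List.slice_toNat _ hk (by omega),
      PySem.List.slice_toNat phrase.toList (by omega) (by omega)]
  have h := slice_comp phrase.toList i.toNat k.toNat (l.toNat - k.toNat) (j.toNat - i.toNat) (by omega)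
  rw [h]
  have e1 : (i + k).toNat = i.toNat + k.toNat := by omega
  have e2 : (i + l).toNat - (i.toNat + k.toNat) = l.toNat - k.toNat := by omega
  rw [e1, e2]

-- the characterisations of A's four nested loops, innermost first
theorem memA4 (sub : String) (k : Int) (s : PySem.Set String) (x : String) :
    x ∈ (PySem.List.pyRange (k + 1) (PySem.Str.len sub) 1).foldl
        (fun acc l => PySem.Set.add acc (PySem.Str.slice sub (some k) (some (l + 1)))) s ↔
    x ∈ s ∨ ∃ l ∈ PySem.List.pyRange (k + 1) (PySem.Str.len sub) 1,
      x = PySem.Str.slice sub (some k) (some (l + 1)) :=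
  mem_foldl_step (fun acc l => PySem.Set.add acc (PySem.Str.slice sub (some k) (some (l + 1))))
    (fun l y => y = PySem.Str.slice sub (some k) (some (l + 1)))
    (fun s l y => by simp [PySem.Set.mem_add]) _ s x

theorem memA3 (sub : String) (s : PySem.Set String) (x : String) :
    x ∈ (PySem.List.pyRange 0 (PySem.Str.len sub) 1).foldl (fun acc k =>
        (PySem.List.pyRange (k + 1) (PySem.Str.len sub) 1).foldl
          (fun acc l => PySem.Set.add acc (PySem.Str.slice sub (some k) (some (l + 1)))) acc) s ↔
    x ∈ s ∨ ∃ k ∈ PySem.List.pyRange 0 (PySem.Str.len sub) 1,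
      ∃ l ∈ PySem.List.pyRange (k + 1) (PySem.Str.len sub) 1,
        x = PySem.Str.slice sub (some k) (some (l + 1)) :=
  mem_foldl_step _
    (fun k y => ∃ l ∈ PySem.List.pyRange (k + 1) (PySem.Str.len sub) 1,
      y = PySem.Str.slice sub (some k) (some (l + 1)))
    (fun s k y => memA4 sub k s y) _ s x

theorem memA2 (phrase : String) (i : Int) (s : PySem.Set String) (x : String) :
    x ∈ (PySem.List.pyRange (i + 1) (PySem.Str.len phrase) 1).foldl (fun acc j =>
        let substring := PySem.Str.slice phrase (some i) (some (j + 1))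
        (PySem.List.pyRange 0 (PySem.Str.len substring) 1).foldl (fun acc k =>
          (PySem.List.pyRange (k + 1) (PySem.Str.len substring) 1).foldl
            (fun acc l => PySem.Set.add acc (PySem.Str.slice substring (some k) (some (l + 1)))) acc) acc) s ↔
    x ∈ s ∨ ∃ j ∈ PySem.List.pyRange (i + 1) (PySem.Str.len phrase) 1,
      ∃ k ∈ PySem.List.pyRange 0 (PySem.Str.len (PySem.Str.slice phrase (some i) (some (j + 1)))) 1,
        ∃ l ∈ PySem.List.pyRange (k + 1) (PySem.Str.len (PySem.Str.slice phrase (some i) (some (j + 1)))) 1,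
          x = PySem.Str.slice (PySem.Str.slice phrase (some i) (some (j + 1))) (some k) (some (l + 1)) :=
  mem_foldl_step _
    (fun j y => ∃ k ∈ PySem.List.pyRange 0 (PySem.Str.len (PySem.Str.slice phrase (some i) (some (j + 1)))) 1,
      ∃ l ∈ PySem.List.pyRange (k + 1) (PySem.Str.len (PySem.Str.slice phrase (some i) (some (j + 1)))) 1,
        y = PySem.Str.slice (PySem.Str.slice phrase (some i) (some (j + 1))) (some k) (some (l + 1)))
    (fun s j y => memA3 (PySem.Str.slice phrase (some i) (some (j + 1))) s y) _ s x

-- the set characterisation of A's four nested loops: the same set as B's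
theorem memA (phrase : String) (x : String) :
    x ∈ (PySem.List.pyRange 0 (PySem.Str.len phrase) 1).foldl (fun acc i =>
        (PySem.List.pyRange (i + 1) (PySem.Str.len phrase) 1).foldl (fun acc j =>
          let substring := PySem.Str.slice phrase (some i) (some (j + 1))
          (PySem.List.pyRange 0 (PySem.Str.len substring) 1).foldl (fun acc k =>
            (PySem.List.pyRange (k + 1) (PySem.Str.len substring) 1).foldl (fun acc l =>
              PySem.Set.add acc (PySem.Str.slice substring (some k) (some (l + 1)))) acc) acc) acc)
      PySem.Set.empty ↔
    ∃ i j : Int, 0 ≤ i ∧ i + 2 ≤ j ∧ j ≤ (phrase.toList.length : Int) ∧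
      x = PySem.Str.slice phrase (some i) (some j) := by
  rw [mem_foldl_step _
    (fun i x => ∃ j ∈ PySem.List.pyRange (i + 1) (PySem.Str.len phrase) 1,
      ∃ k ∈ PySem.List.pyRange 0 (PySem.Str.len (PySem.Str.slice phrase (some i) (some (j + 1)))) 1,
        ∃ l ∈ PySem.List.pyRange (k + 1) (PySem.Str.len (PySem.Str.slice phrase (some i) (some (j + 1)))) 1,
          x = PySem.Str.slice (PySem.Str.slice phrase (some i) (some (j + 1))) (some k) (some (l + 1)))
    (fun s i x => memA2 phrase i s x)]
  simp only [PySem.Set.empty, List.not_mem_nil, false_or, PySem.List.mem_pyRange_one,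
    PySem.Str.len_eq]
  constructor
  · rintro ⟨i, ⟨hi0, hin⟩, j, ⟨hj1, hj2⟩, k, ⟨hk0, hkm⟩, l, ⟨hl1, hlm⟩, rfl⟩
    have hm : ((PySem.Str.slice phrase (some i) (some (j + 1))).toList.length : Int)
        = (j + 1) - i := by
      have h := len_str_slice phrase hi0 (by omega : i ≤ j + 1) (by omega)
      rw [PySem.Str.len_eq] at h
      exact h
    rw [hm] at hkm hlm
    refine ⟨i + k, i + (l + 1), by omega, by omega, by omega, ?_⟩
    exact slice_comp_str phrase hi0 hk0 (by omega) (by omega) (by omega)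
  · rintro ⟨i, j, hi0, hij, hjn, rfl⟩
    have hj1 : j - 1 + 1 = j := by omega
    have hm : ((PySem.Str.slice phrase (some i) (some j)).toList.length : Int) = j - i := by
      have h := len_str_slice phrase hi0 (by omega : i ≤ j) hjn
      rw [PySem.Str.len_eq] at h
      exact h
    refine ⟨i, ⟨hi0, by omega⟩, j - 1, ⟨by omega, by omega⟩, 0, ⟨le_refl 0, ?_⟩,
      j - i - 1, ⟨by omega, ?_⟩, ?_⟩
    · rw [hj1, hm]; omega
    · rw [hj1, hm]; omega
    · rw [hj1]
      have e3 : j - i - 1 + 1 = j - i := by omega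
      rw [e3, slice_comp_str phrase hi0 le_rfl (by omega) (by omega : j - i ≤ j - i) (by omega),
        add_zero, show i + (j - i) = j from by omega]

theorem nodupA (phrase : String) :
    List.Nodup ((PySem.List.pyRange 0 (PySem.Str.len phrase) 1).foldl (fun acc i =>
        (PySem.List.pyRange (i + 1) (PySem.Str.len phrase) 1).foldl (fun acc j =>
          let substring := PySem.Str.slice phrase (some i) (some (j + 1))
          (PySem.List.pyRange 0 (PySem.Str.len substring) 1).foldl (fun acc k =>
            (PySem.List.pyRange (k + 1) (PySem.Str.len substring) 1).foldl (fun acc l =>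
              PySem.Set.add acc (PySem.Str.slice substring (some k) (some (l + 1)))) acc) acc) acc)
      PySem.Set.empty) := by
  apply nodup_foldl_step _ (fun s i hs => ?_) _ _ List.nodup_nil
  apply nodup_foldl_step _ (fun s j hs => ?_) _ _ hs
  apply nodup_foldl_step _ (fun s k hs => ?_) _ _ hs
  apply nodup_foldl_step _ (fun s l hs => ?_) _ _ hs
  exact PySem.Set.nodup_add _ _ hs

theorem nodupB (phrase : String) :
    List.Nodup ((PySem.List.pyRange 0 (PySem.Str.len phrase) 1).foldl (fun acc i =>
        (PySem.List.pyRange (i + 2) (PySem.Str.len phrase + 1) 1).foldl (fun acc j =>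
          PySem.Set.add acc (PySem.Str.slice phrase (some i) (some j))) acc)
      PySem.Set.empty) := by
  apply nodup_foldl_step _ (fun s i hs => ?_) _ _ List.nodup_nil
  apply nodup_foldl_step _ (fun s j hs => ?_) _ _ hs
  exact PySem.Set.nodup_add _ _ hs

-- ===== VERDICT (by name: the statement is the Claim_ definition above) =====
theorem find_nested_substrings_spec : Claim_equal_find_nested_substrings := by
  intro phrase _
  unfold Spec_find_nested_substrings find_nested_substrings find_nested_substrings_alt
  apply PySem.List.sorted_eq_sorted_of_perm _ _ _ (fun a b h => h)
  rw [List.perm_ext_iff_of_nodup (nodupA phrase) (nodupB phrase)]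
  intro x
  rw [memA phrase x, memB phrase x]
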